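-- pv_equiv track=rewrite | github.com/Jasson-01/UBA-IP-2024 | Parciales_Python/Parcial-6-(2024)/solucionParcial6.py | torneo_de_gallinas
-- ===== SOURCE A (Python) =====
-- def torneo_de_gallinas(estrategias: dict[str, str]) -> dict[str, int]:
--     # Inicializar el diccionario de puntajes
--     puntajes = {}
--     for jugador in estrategias:
--         puntajes[jugador] = 0
--
--     # Lista de jugadores
--     jugadores = list(estrategias.keys())
--
--     # Jugar todos contra todos
--     for i in range(len(jugadores)):
--         for j in range(i + 1, len(jugadores)):
--             jugador1 = jugadores[i]
--             jugador2 = jugadores[j]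
--             estrategia1 = estrategias[jugador1]
--             estrategia2 = estrategias[jugador2]
--
--             if estrategia1 == "me desvio siempre" and estrategia2 == "me desvio siempre":
--                 # Ambos se desvían
--                 puntajes[jugador1] -= 10
--                 puntajes[jugador2] -= 10
--             elif estrategia1 == "me la banco y no me desvio" and estrategia2 == "me la banco y no me desvio":
--                 # Ambos chocan
--                 puntajes[jugador1] -= 5
--                 puntajes[jugador2] -= 5
--             elif estrategia1 == "me desvio siempre" and estrategia2 == "me la banco y no me desvio":
--                 # Jugador1 se desvía, Jugador2 no
--                 puntajes[jugador1] -= 15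
--                 puntajes[jugador2] += 10
--             elif estrategia1 == "me la banco y no me desvio" and estrategia2 == "me desvio siempre":
--                 # Jugador1 no se desvía, Jugador2 se desvía
--                 puntajes[jugador1] += 10
--                 puntajes[jugador2] -= 15
--
--     return puntajes
-- ===== SOURCE B (Python) =====
-- def torneo_de_gallinas(estrategias: dict[str, str]) -> dict[str, int]:
--     DES = "me desvio siempre"
--     BAN = "me la banco y no me desvio"
--     vals = list(estrategias.values())
--     d = vals.count(DES)
--     b = vals.count(BAN)
--     puntajes = {}
--     for jugador, s in estrategias.items():
--         if s == DES:
--             puntajes[jugador] = -10 * (d - 1) - 15 * b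
--         elif s == BAN:
--             puntajes[jugador] = 10 * d - 5 * (b - 1)
--         else:
--             puntajes[jugador] = 0
--     return puntajes
-- ===== Notes on version B (the rewrite author's own statement) =====
-- stated objective: faster
-- what changed: Replaced the all-pairs double loop with a single pass: count the two strategies once and compute every player's score by a closed-form formula from those counts.
import Mathlib
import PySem

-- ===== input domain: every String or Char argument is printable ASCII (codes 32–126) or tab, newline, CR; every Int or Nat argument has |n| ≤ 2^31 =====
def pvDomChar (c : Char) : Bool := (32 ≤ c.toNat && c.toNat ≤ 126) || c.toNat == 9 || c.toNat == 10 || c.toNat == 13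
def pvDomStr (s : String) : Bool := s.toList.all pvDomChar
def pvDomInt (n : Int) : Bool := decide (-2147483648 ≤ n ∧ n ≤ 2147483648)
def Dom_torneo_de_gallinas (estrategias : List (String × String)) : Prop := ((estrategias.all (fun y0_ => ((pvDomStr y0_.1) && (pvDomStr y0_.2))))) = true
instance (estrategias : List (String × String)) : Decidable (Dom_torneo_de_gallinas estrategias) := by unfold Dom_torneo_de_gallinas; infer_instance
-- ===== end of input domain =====

-- B replaces A's all-pairs O(n^2) double loop by counting the two strategies once and
-- scoring each player with a closed-form formula from those counts (objective: faster).

-- ===== PORT A =====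
def pvDES : String := "me desvio siempre"
def pvBAN : String := "me la banco y no me desvio"

-- one match of A's inner loop body (the if/elif chain updating both players)
def pvMatchUp (est : PySem.Dict String String) (p : PySem.Dict String Int) (j1 j2 : String) : PySem.Dict String Int :=
  let e1 := est.getD j1 ""
  let e2 := est.getD j2 ""
  if e1 = pvDES ∧ e2 = pvDES then (p.modify j1 0 (· - 10)).modify j2 0 (· - 10)
  else if e1 = pvBAN ∧ e2 = pvBAN then (p.modify j1 0 (· - 5)).modify j2 0 (· - 5)
  else if e1 = pvDES ∧ e2 = pvBAN then (p.modify j1 0 (· - 15)).modify j2 0 (· + 10)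
  else if e1 = pvBAN ∧ e2 = pvDES then (p.modify j1 0 (· + 10)).modify j2 0 (· - 15)
  else p

def torneo_de_gallinas (estrategias : List (String × String)) : List (String × Int) :=
  let est := PySem.Dict.mk estrategias
  let puntajes := est.keys.foldl (fun d j => d.insert j (0 : Int)) PySem.Dict.empty
  let jugadores := est.keys
  let final := (PySem.List.pyRange 0 (jugadores.length : Int) 1).foldl
    (fun p i =>
      (PySem.List.pyRange (i + 1) (jugadores.length : Int) 1).foldl
        (fun p j =>
          pvMatchUp est p (PySem.List.pyGetD jugadores i "") (PySem.List.pyGetD jugadores j ""))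
        p)
    puntajes
  final.items

-- ===== PORT B =====
def pvScore (d b : Int) (s : String) : Int :=
  if s = pvDES then -10 * (d - 1) - 15 * b
  else if s = pvBAN then 10 * d - 5 * (b - 1)
  else 0

def torneo_de_gallinas_alt (estrategias : List (String × String)) : List (String × Int) :=
  let est := PySem.Dict.mk estrategias
  let vals := est.values
  let d : Int := vals.count pvDES
  let b : Int := vals.count pvBAN
  (est.items.foldl (fun r q => r.insert q.1 (pvScore d b q.2)) (PySem.Dict.empty : PySem.Dict String Int)).items

-- ===== PRECONDITION & SPEC =====
-- Pre_ excludes association lists with duplicate keys: a Python dict (A's and B's parameter type) can never contain them.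
def Pre_torneo_de_gallinas (estrategias : List (String × String)) : Prop :=
  (estrategias.map Prod.fst).Nodup
instance (estrategias : List (String × String)) : Decidable (Pre_torneo_de_gallinas estrategias) := by unfold Pre_torneo_de_gallinas; infer_instance

def pvWitness_torneo_de_gallinas : (List (String × String)) :=
  [("ana", "me desvio siempre"), ("bob", "me la banco y no me desvio"), ("eva", "otra cosa")]

def Spec_torneo_de_gallinas (estrategias : List (String × String)) (out : List (String × Int)) : Prop := out = torneo_de_gallinas_alt estrategias
instance (estrategias : List (String × String)) (out : List (String × Int)) : Decidable (Spec_torneo_de_gallinas estrategias out) := by unfold Spec_torneo_de_gallinas; infer_instance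

-- ===== CLAIM (what is proved, stated in full; the proofs are below) =====
def Claim_equal_torneo_de_gallinas : Prop := ∀ (estrategias : List (String × String)), Dom_torneo_de_gallinas estrategias → Pre_torneo_de_gallinas estrategias → Spec_torneo_de_gallinas estrategias (torneo_de_gallinas estrategias)

-- ===== LEMMAS AND PROOFS =====

-- payoff of a player with strategy s against an opponent with strategy t (one half of A's branch table)
def pvPay (s t : String) : Int :=
  if s = pvDES ∧ t = pvDES then -10
  else if s = pvBAN ∧ t = pvBAN then -5
  else if s = pvDES ∧ t = pvBAN then -15
  else if s = pvBAN ∧ t = pvDES then 10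
  else 0

-- structural version of A's double loop: head plays everyone after it, then recurse on the tail
def pvDouble (est : PySem.Dict String String) (xs : List String) (p : PySem.Dict String Int) : PySem.Dict String Int :=
  match xs with
  | [] => p
  | x :: t => pvDouble est t (t.foldl (fun p y => pvMatchUp est p x y) p)

def pvCD (s : String) : Int := if s = pvDES then -10 else if s = pvBAN then 10 else 0
def pvCB (s : String) : Int := if s = pvDES then -15 else if s = pvBAN then -5 else 0

theorem pvDES_ne_pvBAN : pvDES ≠ pvBAN := by decide

theorem getD_pvMatchUp (est : PySem.Dict String String) (p : PySem.Dict String Int) (j1 j2 k : String) :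
    (pvMatchUp est p j1 j2).getD k 0 =
      p.getD k 0 + (if k = j1 then pvPay (est.getD j1 "") (est.getD j2 "") else 0)
        + (if k = j2 then pvPay (est.getD j2 "") (est.getD j1 "") else 0) := by
  simp only [pvMatchUp, pvPay]
  split_ifs with h1 h2 h3 h4 <;>
    simp_all [PySem.Dict.getD_modify, pvDES_ne_pvBAN, pvDES_ne_pvBAN.symm] <;> omega

theorem keys_pvMatchUp (est : PySem.Dict String String) (p : PySem.Dict String Int) {j1 j2 : String}
    (h1 : p.contains j1 = true) (h2 : p.contains j2 = true) :
    (pvMatchUp est p j1 j2).keys = p.keys := by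
  have step : ∀ (q : PySem.Dict String Int) (j : String) (f : Int → Int), q.contains j = true →
      (q.modify j 0 f).keys = q.keys := by
    intro q j f hq
    rw [PySem.Dict.keys_modify, PySem.Dict.keys_insert_of_contains _ _ hq]
  have h2' : ∀ f, ((p.modify j1 0 f).contains j2) = true := by
    intro f; rw [PySem.Dict.contains_modify]; simp [h2]
  simp only [pvMatchUp]
  split_ifs <;> first
    | rfl
    | (rw [step _ j2 _ (h2' _), step _ j1 _ h1])

theorem contains_pvMatchUp (est : PySem.Dict String String) (p : PySem.Dict String Int) {j1 j2 : String}
    (h1 : p.contains j1 = true) (h2 : p.contains j2 = true) (k : String) :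
    (pvMatchUp est p j1 j2).contains k = p.contains k := by
  rw [PySem.Dict.contains_eq_decide_mem_keys, PySem.Dict.contains_eq_decide_mem_keys,
    keys_pvMatchUp est p h1 h2]

theorem keys_innerFold (est : PySem.Dict String String) (x : String) :
    ∀ (xs : List String) (p : PySem.Dict String Int),
      p.contains x = true → (∀ y ∈ xs, p.contains y = true) →
      ((xs.foldl (fun p y => pvMatchUp est p x y) p).keys = p.keys) := by
  intro xs
  induction xs with
  | nil => intro p _ _; rfl
  | cons y t ih =>
    intro p hx hall
    have hy : p.contains y = true := hall y (by simp)
    have hk : (pvMatchUp est p x y).keys = p.keys := keys_pvMatchUp est p hx hy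
    have hc : ∀ k, (pvMatchUp est p x y).contains k = p.contains k :=
      contains_pvMatchUp est p hx hy
    simp only [List.foldl_cons]
    rw [ih (pvMatchUp est p x y) (by rw [hc]; exact hx)
      (fun z hz => by rw [hc]; exact hall z (by simp [hz]))]
    exact hk

theorem getD_innerFold_ne (est : PySem.Dict String String) (x k : String) (hk : k ≠ x) :
    ∀ (xs : List String) (p : PySem.Dict String Int),
      ((xs.foldl (fun p y => pvMatchUp est p x y) p).getD k 0
        = p.getD k 0 + (xs.count k : Int) * pvPay (est.getD k "") (est.getD x "")) := by
  intro xs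
  induction xs with
  | nil => intro p; simp
  | cons y t ih =>
    intro p
    simp only [List.foldl_cons]
    rw [ih, getD_pvMatchUp]
    by_cases hyk : y = k
    · subst hyk
      simp [hk]
      ring
    · simp [hk, hyk, Ne.symm hyk]

theorem getD_innerFold_self (est : PySem.Dict String String) (x : String) :
    ∀ (xs : List String) (p : PySem.Dict String Int), x ∉ xs →
      ((xs.foldl (fun p y => pvMatchUp est p x y) p).getD x 0
        = p.getD x 0 + ((xs.map (fun y => pvPay (est.getD x "") (est.getD y ""))).sum)) := by
  intro xs
  induction xs with
  | nil => intro p _; simp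
  | cons y t ih =>
    intro p hx
    have hxy : x ≠ y := fun h => hx (by simp [h])
    have hxt : x ∉ t := fun h => hx (by simp [h])
    simp only [List.foldl_cons]
    rw [ih _ hxt, getD_pvMatchUp]
    simp [hxy]
    ring

theorem keys_pvDouble (est : PySem.Dict String String) :
    ∀ (xs : List String) (p : PySem.Dict String Int),
      (∀ y ∈ xs, p.contains y = true) → (pvDouble est xs p).keys = p.keys := by
  intro xs
  induction xs with
  | nil => intro p _; rfl
  | cons x t ih =>
    intro p hall
    have hx : p.contains x = true := hall x (by simp)
    have ht : ∀ y ∈ t, p.contains y = true := fun y hy => hall y (by simp [hy])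
    have hkeys : ((t.foldl (fun p y => pvMatchUp est p x y) p).keys = p.keys) :=
      keys_innerFold est x t p hx ht
    have hcont : ∀ k, (t.foldl (fun p y => pvMatchUp est p x y) p).contains k = p.contains k := by
      intro k
      rw [PySem.Dict.contains_eq_decide_mem_keys, PySem.Dict.contains_eq_decide_mem_keys, hkeys]
    simp only [pvDouble]
    rw [ih _ (fun y hy => by rw [hcont]; exact ht y hy)]
    exact hkeys

theorem getD_pvDouble_notMem (est : PySem.Dict String String) (k : String) :
    ∀ (xs : List String) (p : PySem.Dict String Int), k ∉ xs →
      (pvDouble est xs p).getD k 0 = p.getD k 0 := by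
  intro xs
  induction xs with
  | nil => intro p _; rfl
  | cons x t ih =>
    intro p hk
    have hkx : k ≠ x := fun h => hk (by simp [h])
    have hkt : k ∉ t := fun h => hk (by simp [h])
    simp only [pvDouble]
    rw [ih _ hkt, getD_innerFold_ne est x k hkx]
    simp [List.count_eq_zero_of_not_mem hkt]

theorem getD_pvDouble_mem (est : PySem.Dict String String) (k : String) :
    ∀ (xs : List String) (p : PySem.Dict String Int), xs.Nodup → k ∈ xs →
      (pvDouble est xs p).getD k 0 = p.getD k 0
        + ((xs.map (fun y => pvPay (est.getD k "") (est.getD y ""))).sum)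
        - pvPay (est.getD k "") (est.getD k "") := by
  intro xs
  induction xs with
  | nil => intro p _ hk; simp at hk
  | cons x t ih =>
    intro p hnd hk
    have hndt : t.Nodup := hnd.of_cons
    have hxt : x ∉ t := (List.nodup_cons.mp hnd).1
    simp only [pvDouble]
    by_cases hkx : k = x
    · subst hkx
      rw [getD_pvDouble_notMem est k t _ hxt, getD_innerFold_self est k t p hxt]
      simp only [List.map_cons, List.sum_cons]
      ring
    · have hkt : k ∈ t := by rcases List.mem_cons.mp hk with h | h; exact absurd h hkx; exact h
      rw [ih _ hndt hkt, getD_innerFold_ne est x k hkx,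
        List.count_eq_one_of_mem hndt hkt]
      simp only [List.map_cons, List.sum_cons]
      ring

-- A's index-based double loop is pvDouble on the suffix
theorem outer_loop_eq_pvDouble (est : PySem.Dict String String) (jug : List String) :
    ∀ (n a : Nat) (p : PySem.Dict String Int), a + n = jug.length →
      ((PySem.List.pyRange (a : Int) (jug.length : Int)).foldl
        (fun p i =>
          (PySem.List.pyRange (i + 1) (jug.length : Int)).foldl
            (fun p j =>
              pvMatchUp est p (PySem.List.pyGetD jug i "") (PySem.List.pyGetD jug j "")) p)
        p)
      = pvDouble est (jug.drop a) p := by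
  intro n
  induction n with
  | zero =>
    intro a p ha
    have h1 : (jug.length : Int) ≤ (a : Int) := by omega
    rw [PySem.List.pyRange_one_eq_nil h1]
    have : jug.drop a = [] := List.drop_of_length_le (by omega)
    rw [this]
    rfl
  | succ m ih =>
    intro a p ha
    have hlt : (a : Int) < (jug.length : Int) := by omega
    have haN : a < jug.length := by omega
    rw [PySem.List.pyRange_one_cons hlt, List.foldl_cons]
    have hget : PySem.List.pyGetD jug (a : Int) "" = jug[a] := by
      rw [PySem.List.pyGetD_natCast, List.getD_eq_getElem _ _ haN]
    have hcast : (a : Int) + 1 = ((a + 1 : Nat) : Int) := by push_cast; ring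
    have hinner :
        ((PySem.List.pyRange ((a : Int) + 1) (jug.length : Int)).foldl
          (fun p j => pvMatchUp est p (PySem.List.pyGetD jug (a : Int) "") (PySem.List.pyGetD jug j "")) p)
        = (jug.drop (a + 1)).foldl (fun p y => pvMatchUp est p jug[a] y) p := by
      rw [hget, hcast]
      have := PySem.List.foldl_pyRange_pyGetD' jug "" (fun p y => pvMatchUp est p jug[a] y) p
        (a := ((a + 1 : Nat) : Int)) (by positivity)
      rw [this]
      norm_num
    rw [hinner, hcast, ih (a + 1) _ (by omega)]
    have hdrop : jug.drop a = jug[a] :: jug.drop (a + 1) := List.drop_eq_getElem_cons haN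
    rw [hdrop]
    rfl

theorem getD_initFold (k : String) :
    ∀ (l : List String) (d : PySem.Dict String Int), d.getD k 0 = 0 →
      (l.foldl (fun d j => d.insert j (0 : Int)) d).getD k 0 = 0 := by
  intro l
  induction l with
  | nil => intro d h; exact h
  | cons x t ih =>
    intro d h
    simp only [List.foldl_cons]
    exact ih _ (by rw [PySem.Dict.getD_insert]; split_ifs <;> simp [h])

theorem pvPay_eq (s t : String) :
    pvPay s t = if t = pvDES then pvCD s else if t = pvBAN then pvCB s else 0 := by
  simp only [pvPay, pvCD, pvCB]
  split_ifs <;> simp_all [pvDES_ne_pvBAN, pvDES_ne_pvBAN.symm]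

theorem sum_pvPay (s : String) :
    ∀ (l : List String),
      ((l.map (fun t => pvPay s t)).sum)
        = pvCD s * (l.count pvDES : Int) + pvCB s * (l.count pvBAN : Int) := by
  intro l
  induction l with
  | nil => simp
  | cons y t ih =>
    simp only [List.map_cons, List.sum_cons, ih]
    rw [pvPay_eq]
    by_cases h1 : y = pvDES
    · simp_all [List.count_cons]; ring
    · by_cases h2 : y = pvBAN
      · simp_all; ring
      · simp_all

theorem pv_getD_mk {l : List (String × String)} (hnd : (l.map Prod.fst).Nodup)
    {q : String × String} (hq : q ∈ l) :
    (PySem.Dict.mk l).getD q.1 "" = q.2 := by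
  exact PySem.Dict.getD_of_mem_items _ hq hnd ""

theorem pvScore_eq (s : String) (d b : Int) :
    pvCD s * d + pvCB s * b - pvPay s s = pvScore d b s := by
  simp only [pvCD, pvCB, pvPay, pvScore]
  by_cases h1 : s = pvDES <;> by_cases h2 : s = pvBAN <;>
    simp_all [pvDES_ne_pvBAN, pvDES_ne_pvBAN.symm] <;> ring

theorem torneo_main (l : List (String × String)) (hPre : (l.map Prod.fst).Nodup) :
    torneo_de_gallinas l = torneo_de_gallinas_alt l := by
  simp only [torneo_de_gallinas, torneo_de_gallinas_alt]
  have hkeys : (PySem.Dict.mk l).keys = l.map Prod.fst := rfl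
  have hvals : (PySem.Dict.mk l).values = l.map Prod.snd := rfl
  rw [hkeys, hvals]
  -- the initial score dict
  have hinit_items :
      ((l.map Prod.fst).foldl (fun d j => d.insert j (0 : Int)) PySem.Dict.empty).items
        = (l.map Prod.fst).map (fun a => (a, (0 : Int))) := by
    have := PySem.Dict.items_foldl_insert_fresh (l := l.map Prod.fst) (k := fun j => j)
      (v := fun _ => (0 : Int)) (d := PySem.Dict.empty)
      (fun a _ => by simp [pysem]) (by simpa using hPre)
    simpa using this
  have hinit_keys :
      ((l.map Prod.fst).foldl (fun d j => d.insert j (0 : Int)) PySem.Dict.empty).keys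
        = l.map Prod.fst := by
    show ((l.map Prod.fst).foldl (fun d j => d.insert j (0 : Int)) PySem.Dict.empty).items.map Prod.fst
        = l.map Prod.fst
    rw [hinit_items, List.map_map]
    simp
  have hinit_cont : ∀ y ∈ l.map Prod.fst,
      ((l.map Prod.fst).foldl (fun d j => d.insert j (0 : Int)) PySem.Dict.empty).contains y = true := by
    intro y hy
    rw [PySem.Dict.contains_eq_decide_mem_keys, hinit_keys]
    simpa using hy
  -- A's double loop is pvDouble over the players
  have houter := outer_loop_eq_pvDouble (PySem.Dict.mk l) (l.map Prod.fst)
    (l.map Prod.fst).length 0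
    ((l.map Prod.fst).foldl (fun d j => d.insert j (0 : Int)) PySem.Dict.empty) (by omega)
  simp only [Nat.cast_zero, List.drop_zero] at houter
  rw [houter]
  -- B's result dict
  have hBitems :
      (l.foldl (fun r q => r.insert q.1
          (pvScore ((l.map Prod.snd).count pvDES : Int) ((l.map Prod.snd).count pvBAN : Int) q.2))
        PySem.Dict.empty).items
      = l.map (fun q => (q.1,
          pvScore ((l.map Prod.snd).count pvDES : Int) ((l.map Prod.snd).count pvBAN : Int) q.2)) := by
    have := PySem.Dict.items_foldl_insert_fresh (l := l) (k := Prod.fst)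
      (v := fun q => pvScore ((l.map Prod.snd).count pvDES : Int) ((l.map Prod.snd).count pvBAN : Int) q.2)
      (d := PySem.Dict.empty) (fun a _ => by simp [pysem]) hPre
    simpa using this
  rw [hBitems]
  -- A's result dict: keys and items
  have hfin_keys : (pvDouble (PySem.Dict.mk l) (l.map Prod.fst)
      ((l.map Prod.fst).foldl (fun d j => d.insert j (0 : Int)) PySem.Dict.empty)).keys
      = l.map Prod.fst := by
    rw [keys_pvDouble _ _ _ hinit_cont, hinit_keys]
  have hfin_nodup : (pvDouble (PySem.Dict.mk l) (l.map Prod.fst)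
      ((l.map Prod.fst).foldl (fun d j => d.insert j (0 : Int)) PySem.Dict.empty)).keys.Nodup := by
    rw [hfin_keys]; exact hPre
  rw [PySem.Dict.items_eq_map_keys _ hfin_nodup 0, hfin_keys, List.map_map]
  -- pointwise over l
  apply List.map_congr_left
  intro q hq
  have hmem : q.1 ∈ l.map Prod.fst := List.mem_map_of_mem hq
  simp only [Function.comp]
  rw [getD_pvDouble_mem _ _ _ _ hPre hmem]
  have hinit0 : ((l.map Prod.fst).foldl (fun d j => d.insert j (0 : Int)) PySem.Dict.empty).getD q.1 0
      = 0 := getD_initFold q.1 (l.map Prod.fst) _ (by simp [pysem])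
  rw [hinit0, pv_getD_mk hPre hq]
  have hmapK : (l.map Prod.fst).map (fun y => pvPay q.2 ((PySem.Dict.mk l).getD y ""))
      = (l.map Prod.snd).map (fun t => pvPay q.2 t) := by
    rw [List.map_map, List.map_map]
    apply List.map_congr_left
    intro r hr
    simp only [Function.comp]
    rw [pv_getD_mk hPre hr]
  rw [hmapK, sum_pvPay, zero_add, pvScore_eq]

-- ===== VERDICT (by name: the statement is the Claim_ definition above) =====
theorem torneo_de_gallinas_spec : Claim_equal_torneo_de_gallinas := by
  intro l _ hPre
  unfold Spec_torneo_de_gallinas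
  exact torneo_main l hPre
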